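-- pv_equiv track=rewrite | github.com/jeppeter/py-obcode | src/strparser.py | expand_bit
-- ===== SOURCE A (Python) =====
-- def get_bits(num):
--     bits = 0
--     fnum = num
--     while fnum > 0:
--         if fnum & 1:
--             bits += 1
--         fnum >>= 1
--     return bits
--
-- def expand_bit(num,nbit):
--     num = num & 0xff
--     bits = get_bits(num)
--     maxbits = (8 - bits)
--     # if all is expand bit ,so we just return 0xff
--     if maxbits == 0:
--         return 0xff
--     needbit = (nbit % maxbits)
--     needbit += 1
--     curbit = 0
--     cnum = 1
--     fnum = num
--     while curbit < needbit:
--         if (fnum & cnum)== 0: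
--             # this is the not set ,so just set for it
--             curbit += 1
--             if curbit == needbit:
--                 fnum = fnum | cnum
--                 return fnum
--         cnum <<= 1
--     return fnum
-- ===== SOURCE B (Python) =====
-- def expand_bit(num, nbit):
--     # work on the complement mask: set bits of z are the unset bits of the low byte
--     z = ~num & 0xff
--     if z == 0:
--         return 0xff
--     zc, t = 0, z
--     while t:                 # Kernighan popcount of the complement mask
--         t &= t - 1
--         zc += 1
--     for _ in range(nbit % zc):
--         z &= z - 1           # drop the lowest remaining candidate bit
--     return (num & 0xff) | (z & -z)   # isolate the target bit and set it
-- ===== Notes on version B (the rewrite author's own statement) =====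
-- stated objective: alternative
-- what changed: A scans the byte position by position with a running counter of unset bits and early-returns at the target position; B never looks at positions: it forms the complement mask z = ~num & 0xff, popcounts it by Kernighan's z &= z-1, clears the nbit%zc lowest set bits of z the same way, and isolates the target bit arithmetically with z & -z.
import Mathlib
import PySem

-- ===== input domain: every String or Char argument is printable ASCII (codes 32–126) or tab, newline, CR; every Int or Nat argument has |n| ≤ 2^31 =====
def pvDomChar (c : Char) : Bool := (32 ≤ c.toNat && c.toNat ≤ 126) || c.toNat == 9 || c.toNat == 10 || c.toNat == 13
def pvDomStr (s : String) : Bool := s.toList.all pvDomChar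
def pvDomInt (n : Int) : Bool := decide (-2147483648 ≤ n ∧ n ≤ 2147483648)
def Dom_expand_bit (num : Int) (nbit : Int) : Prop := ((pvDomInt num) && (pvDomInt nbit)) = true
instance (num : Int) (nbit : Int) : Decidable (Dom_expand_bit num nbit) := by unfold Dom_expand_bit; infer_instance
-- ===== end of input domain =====

-- B replaces A's positional scan-and-count with bit arithmetic on the complement mask
-- (Kernighan clearing + z & -z isolation); objective: alternative.

-- ===== PORT A =====
-- the `while fnum > 0` loop of Python's get_bits (state: fnum, bits); fuel is a port
-- artifact: every caller passes a masked byte (0 ≤ fnum < 256), so 16 iterations always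
-- reach the loop's own exit `fnum > 0` failing, and fuel exhaustion returns bits like that exit
def get_bits_loop (fuel : Nat) (fnum : Int) (bits : Int) : Int :=
  match fuel with
  | 0 => bits
  | fuel + 1 =>
    if 0 < fnum then
      get_bits_loop fuel (fnum >>> (1:Nat)) (if PySem.Int.band fnum 1 ≠ 0 then bits + 1 else bits)
    else bits

def get_bits (num : Int) : Int := get_bits_loop 16 num 0

-- the `while curbit < needbit` loop of A; fuel is a port artifact: the loop always
-- returns within 16 iterations here (fnum < 256 and needbit ≤ number of zero bits),
-- and on fuel exhaustion we return fnum exactly like Python's (unreachable) trailing `return fnum`.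
def expand_bit_loop (fuel : Nat) (needbit curbit cnum fnum : Int) : Int :=
  match fuel with
  | 0 => fnum
  | fuel + 1 =>
    if curbit < needbit then
      if PySem.Int.band fnum cnum = 0 then
        let curbit := curbit + 1
        if curbit = needbit then PySem.Int.bor fnum cnum
        else expand_bit_loop fuel needbit curbit (cnum <<< (1:Nat)) fnum
      else expand_bit_loop fuel needbit curbit (cnum <<< (1:Nat)) fnum
    else fnum

def expand_bit (num : Int) (nbit : Int) : Int :=
  let num := PySem.Int.band num 255
  let bits := get_bits num
  let maxbits := 8 - bits
  if maxbits = 0 then 255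
  else
    let needbit := PySem.Int.mod nbit maxbits + 1
    expand_bit_loop 16 needbit 0 1 num

-- ===== PORT B =====
-- Kernighan popcount: `while t: t &= t-1; zc += 1`; fuel 16 is a port artifact (t is a byte,
-- so ≤ 8 iterations reach the loop exit t = 0; exhaustion returns zc like that exit)
def kern_count (fuel : Nat) (t : Int) (zc : Int) : Int :=
  match fuel with
  | 0 => zc
  | fuel + 1 =>
    if t ≠ 0 then kern_count fuel (PySem.Int.band t (t - 1)) (zc + 1) else zc

-- `for _ in range(nbit % zc): z &= z - 1`
def kern_clear (num : Int) (z : Int) : Int :=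
  (PySem.List.pyRange 0 num 1).foldl (fun z _ => PySem.Int.band z (z - 1)) z

def expand_bit_alt (num : Int) (nbit : Int) : Int :=
  let z := PySem.Int.band (-num - 1) 255          -- ~num & 0xff
  if z = 0 then 255
  else
    let zc := kern_count 16 z 0
    let z' := kern_clear (PySem.Int.mod nbit zc) z
    PySem.Int.bor (PySem.Int.band num 255) (PySem.Int.band z' (-z'))

-- ===== PRECONDITION & SPEC =====
def Spec_expand_bit (num : Int) (nbit : Int) (out : Int) : Prop := out = expand_bit_alt num nbit
instance (num : Int) (nbit : Int) (out : Int) : Decidable (Spec_expand_bit num nbit out) := by unfold Spec_expand_bit; infer_instance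

-- ===== CLAIM (what is proved, stated in full; the proofs are below) =====
def Claim_equal_expand_bit : Prop := ∀ (num : Int) (nbit : Int), Dom_expand_bit num nbit → Spec_expand_bit num nbit (expand_bit num nbit)

-- ===== LEMMAS AND PROOFS =====

-- Python's n & 255 is n mod 256 (reduces both programs to functions of the byte num % 256)
theorem band255_eq_mod (n : Int) : PySem.Int.band n 255 = n % 256 := by
  unfold PySem.Int.band
  have h255 : (0:Int) ≤ 255 := by norm_num
  simp only [if_pos h255]
  split_ifs with h
  · have h2 : n.toNat &&& 255 = n.toNat % 256 := by
      simpa using Nat.and_two_pow_sub_one_eq_mod n.toNat 8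
    simp only [show Int.toNat 255 = 255 from rfl, h2]
    omega
  · have h2 : 255 &&& (-n - 1).toNat = (-n - 1).toNat % 256 := by
      rw [Nat.and_comm]; simpa using Nat.and_two_pow_sub_one_eq_mod (-n - 1).toNat 8
    simp only [show Int.toNat 255 = 255 from rfl, h2]
    omega

-- the finite core over all 256 bytes: A's maxbits equals B's Kernighan popcount of the
-- complement, the empty cases coincide, and for every admissible r A's counting scan
-- returns exactly B's clear-r-then-isolate value
set_option maxRecDepth 8192 in
theorem key_byte :
    ∀ k : Nat, k < 256 →
      (8 - get_bits_loop 16 (k : Int) 0 = kern_count 16 (255 - (k : Int)) 0) ∧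
      ((255 - (k : Int) = 0) ↔ (8 - get_bits_loop 16 (k : Int) 0 = 0)) ∧
      (255 - (k : Int) ≠ 0 → 0 < kern_count 16 (255 - (k : Int)) 0) ∧
      ∀ r : Nat, r < (kern_count 16 (255 - (k : Int)) 0).toNat →
        expand_bit_loop 16 ((r : Int) + 1) 0 1 (k : Int) =
          PySem.Int.bor (k : Int)
            (PySem.Int.band (kern_clear (r : Int) (255 - (k : Int)))
              (-(kern_clear (r : Int) (255 - (k : Int))))) := by
  decide

-- ===== VERDICT (by name: the statement is the Claim_ definition above) =====
theorem expand_bit_spec : Claim_equal_expand_bit := by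
  intro num nbit _
  unfold Spec_expand_bit
  show expand_bit num nbit = expand_bit_alt num nbit
  simp only [expand_bit, expand_bit_alt, get_bits]
  have hz : PySem.Int.band (-num - 1) 255 = 255 - num % 256 := by
    rw [band255_eq_mod]; omega
  rw [hz, band255_eq_mod]
  obtain ⟨k, hk, hkm⟩ : ∃ k : Nat, k < 256 ∧ (k : Int) = num % 256 :=
    ⟨(num % 256).toNat, by omega, by omega⟩
  rw [← hkm]
  obtain ⟨hcnt, hempty, hpos, hloop⟩ := key_byte k hk
  rw [hcnt]
  by_cases h0 : (255 - (k : Int)) = 0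
  · rw [if_pos (hcnt ▸ hempty.mp h0), if_pos h0]
  · have hm0 : ¬ (kern_count 16 (255 - (k : Int)) 0 = 0) := by
      intro h; exact h0 (hempty.mpr (hcnt.trans h))
    rw [if_neg hm0, if_neg h0]
    have hzcpos : (0:Int) < kern_count 16 (255 - (k : Int)) 0 := hpos h0
    set r := PySem.Int.mod nbit (kern_count 16 (255 - (k : Int)) 0) with hr
    have hr0 : 0 ≤ r := PySem.Int.mod_nonneg nbit hzcpos
    have hr1 : r < kern_count 16 (255 - (k : Int)) 0 := PySem.Int.mod_lt nbit hzcpos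
    obtain ⟨r', hr', hrr⟩ : ∃ r' : Nat, r' < (kern_count 16 (255 - (k : Int)) 0).toNat ∧ (r' : Int) = r :=
      ⟨r.toNat, by omega, by omega⟩
    rw [← hrr]
    exact hloop r' hr'
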